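-- pv_equiv track=rewrite | github.com/sonny0430/Coding_Python | 프로그래머스/0/120837. 개미 군단/개미 군단.py | solution
-- ===== SOURCE A (Python) =====
-- def solution(hp):
--     result = 0
--     temp_hp = hp
--     for i in range(hp):
--         if temp_hp >= 5:
--             result += temp_hp // 5
--             temp_hp = temp_hp % 5
--         elif temp_hp >= 3:
--             result += temp_hp // 3
--             temp_hp = temp_hp % 3
--         elif temp_hp >= 1:
--             result += temp_hp // 1
--             temp_hp = temp_hp % 1
--         else:
--             break
--     return result
-- ===== SOURCE B (Python) =====
-- def solution(hp):
--     n = max(hp, 0)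
--     return n // 5 + (n % 5) // 3 + (n % 5) % 3
-- ===== Notes on version B (the rewrite author's own statement) =====
-- stated objective: simpler
-- what changed: Replaced A's loop (which greedily divides by 5/3/1 with an accumulator and break) by the closed-form arithmetic count n//5 + (n%5)//3 + (n%5)%3 on the value clamped to 0.
import Mathlib
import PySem

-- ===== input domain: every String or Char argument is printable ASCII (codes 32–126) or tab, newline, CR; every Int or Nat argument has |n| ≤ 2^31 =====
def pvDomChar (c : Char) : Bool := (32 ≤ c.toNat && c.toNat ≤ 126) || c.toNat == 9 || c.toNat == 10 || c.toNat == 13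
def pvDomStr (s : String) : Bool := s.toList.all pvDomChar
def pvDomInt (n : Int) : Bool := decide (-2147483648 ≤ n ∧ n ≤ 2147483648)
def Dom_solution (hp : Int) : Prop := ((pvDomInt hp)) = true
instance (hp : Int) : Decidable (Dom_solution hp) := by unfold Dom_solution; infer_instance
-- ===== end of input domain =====

-- B replaces A's greedy loop by the equivalent closed-form count n//5 + (n%5)//3 + (n%5)%3 (clamped at 0): simpler, no loop state.


-- ===== PORT A =====
-- the 'for i in range(hp)' loop with its break, iterated hp.toNat times (range(hp) is empty for hp ≤ 0)
def solutionLoop : Nat → Int → Int → Int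
  | 0, result, _ => result
  | n + 1, result, temp =>
    if temp ≥ 5 then solutionLoop n (result + PySem.Int.floordiv temp 5) (PySem.Int.mod temp 5)
    else if temp ≥ 3 then solutionLoop n (result + PySem.Int.floordiv temp 3) (PySem.Int.mod temp 3)
    else if temp ≥ 1 then solutionLoop n (result + PySem.Int.floordiv temp 1) (PySem.Int.mod temp 1)
    else result

def solution (hp : Int) : Int := solutionLoop hp.toNat 0 hp

-- ===== PORT B =====
def solution_alt (hp : Int) : Int :=
  let n := max hp 0
  PySem.Int.floordiv n 5 + PySem.Int.floordiv (PySem.Int.mod n 5) 3 + PySem.Int.mod (PySem.Int.mod n 5) 3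

-- ===== PRECONDITION & SPEC =====
def Spec_solution (hp : Int) (out : Int) : Prop := out = solution_alt hp
instance (hp : Int) (out : Int) : Decidable (Spec_solution hp out) := by unfold Spec_solution; infer_instance

-- ===== CLAIM (what is proved, stated in full; the proofs are below) =====
def Claim_equal_solution : Prop := ∀ (hp : Int), Dom_solution hp → Spec_solution hp (solution hp)

-- ===== LEMMAS AND PROOFS =====

-- the closed form on a nonnegative value
def pvClosed (t : Int) : Int := t / 5 + (t % 5) / 3 + (t % 5) % 3

theorem solutionLoop_closed (n : Nat) : ∀ (t r : Int), 0 ≤ t → t ≤ (n : Int) →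
    solutionLoop n r t = r + pvClosed t := by
  induction n with
  | zero =>
    intro t r ht hn
    have : t = 0 := le_antisymm (by exact_mod_cast hn) ht
    subst this
    simp [solutionLoop, pvClosed]
  | succ n ih =>
    intro t r ht hn
    rw [solutionLoop]
    by_cases h5 : t ≥ 5
    · rw [if_pos h5,
        PySem.Int.floordiv_eq_ediv_of_pos (a := t) (by norm_num),
        PySem.Int.mod_eq_emod_of_pos (a := t) (by norm_num)]
      rw [ih (t % 5) _ (by omega) (by push_cast at hn ⊢; omega)]
      unfold pvClosed
      omega
    · rw [if_neg h5]
      by_cases h3 : t ≥ 3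
      · rw [if_pos h3,
          PySem.Int.floordiv_eq_ediv_of_pos (a := t) (by norm_num),
          PySem.Int.mod_eq_emod_of_pos (a := t) (by norm_num)]
        rw [ih (t % 3) _ (by omega) (by push_cast at hn ⊢; omega)]
        unfold pvClosed
        omega
      · rw [if_neg h3]
        by_cases h1 : t ≥ 1
        · rw [if_pos h1,
            PySem.Int.floordiv_eq_ediv_of_pos (a := t) (by norm_num),
            PySem.Int.mod_eq_emod_of_pos (a := t) (by norm_num)]
          rw [ih (t % 1) _ (by omega) (by push_cast at hn ⊢; omega)]
          unfold pvClosed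
          omega
        · rw [if_neg h1]
          have : t = 0 := by omega
          subst this
          simp [pvClosed]

-- ===== VERDICT (by name: the statement is the Claim_ definition above) =====
theorem solution_spec : Claim_equal_solution := by
  intro hp _
  unfold Spec_solution solution solution_alt
  by_cases h : 0 ≤ hp
  · rw [solutionLoop_closed hp.toNat hp 0 h (by simp [Int.toNat_of_nonneg h])]
    show 0 + pvClosed hp = _
    simp only [max_eq_left h,
      PySem.Int.floordiv_eq_ediv_of_pos (a := hp) (b := 5) (by norm_num),
      PySem.Int.mod_eq_emod_of_pos (a := hp) (b := 5) (by norm_num),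
      PySem.Int.floordiv_eq_ediv_of_pos (a := hp % 5) (b := 3) (by norm_num),
      PySem.Int.mod_eq_emod_of_pos (a := hp % 5) (b := 3) (by norm_num)]
    simp [pvClosed]
  · have ht : hp.toNat = 0 := by omega
    have hm : max hp 0 = 0 := by omega
    rw [ht]
    show solutionLoop 0 0 hp = _
    simp [solutionLoop, hm, PySem.Int.floordiv, PySem.Int.mod]
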